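-- pv_equiv track=rewrite | github.com/Aru9/codilityExercisesPython | CodilityExercises/ExamQuestions/Potholefix.py | solution
-- ===== SOURCE A (Python) =====
-- def solution(s):
--   """
--   Calculates the number of "holes" in a string based on a specific pattern.
--
--   Args:
--     s: The input string.
--
--   Returns:
--     The number of "holes" counted.
--   """
--   holes = 0
--   i = 0
--   while i < len(s):
--     if s[i] == 'X':
--       holes += 1
--       i += 3  # Increment by 3 to skip the 'X' and the next two characters
--     else:
--       i += 1  # Move to the next character if it's not 'X'
--   return holes
-- ===== SOURCE B (Python) =====
-- def solution(s):
--     # Recursive decomposition via str.partition: find the first 'X' with a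
--     # library substring search, count it, and recurse on the remainder after
--     # skipping the two characters that follow it.
--     before, x, after = s.partition('X')
--     if not x:
--         return 0
--     return 1 + solution(after[2:])
-- ===== Notes on version B (the rewrite author's own statement) =====
-- stated objective: faster
-- what changed: Replaces the explicit index-jumping while loop over characters by a recursive decomposition using str.partition: a C-level library substring search jumps straight to the next 'X' and the function recurses on the tail after dropping two characters.
import Mathlib
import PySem

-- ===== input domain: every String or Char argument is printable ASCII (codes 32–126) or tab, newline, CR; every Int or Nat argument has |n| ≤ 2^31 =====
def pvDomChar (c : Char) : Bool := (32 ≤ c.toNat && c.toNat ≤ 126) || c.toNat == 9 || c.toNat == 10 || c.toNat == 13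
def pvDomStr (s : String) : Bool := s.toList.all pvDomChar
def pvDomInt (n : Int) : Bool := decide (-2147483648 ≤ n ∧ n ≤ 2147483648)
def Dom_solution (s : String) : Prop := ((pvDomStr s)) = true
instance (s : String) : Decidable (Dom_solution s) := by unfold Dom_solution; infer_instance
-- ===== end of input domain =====

-- B replaces A's index-jumping while loop by a recursive decomposition using
-- str.partition (library substring search + recursion on the remainder);
-- equal return value on all strings (both total).


-- ===== PORT A =====
-- while i < len(s): if s[i] == 'X' then holes += 1; i += 3 else i += 1
def solutionGo (cs : List Char) (holes : Int) (i : Nat) : Int :=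
  if h : i < cs.length then
    if cs[i] = 'X' then solutionGo cs (holes + 1) (i + 3)
    else solutionGo cs holes (i + 1)
  else holes
termination_by cs.length - i

def solution (s : String) : Int := solutionGo s.toList 0 0

-- ===== PORT B =====
-- before, x, after = s.partition('X'); if not x: return 0; return 1 + solution(after[2:])
-- partition is not in PySem: it is ported by hand, exactly — it searches for the
-- first occurrence of 'X' (PySem.Chars.find, = str.find); if absent, x is empty
-- (the 'if not x' branch); otherwise after = everything past that occurrence
-- (drop (j+1)) and after[2:] = drop 2 of it.
def solutionAltGo (cs : List Char) : Int :=
  let j := PySem.Chars.find cs ['X']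
  if h : j = -1 then 0
  else 1 + solutionAltGo ((cs.drop (j.toNat + 1)).drop 2)
termination_by cs.length
decreasing_by
  have h0 : 0 ≤ PySem.Chars.find cs ['X'] := by
    rcases lt_or_eq_of_le (PySem.Chars.neg_one_le_find cs ['X']) with h1 | h1
    · omega
    · exact absurd h1.symm h
  have hpre := (PySem.Chars.find_spec (s := cs) (sub := ['X']) h0).1
  have hlt : (PySem.Chars.find cs ['X']).toNat < cs.length := by
    by_contra hge
    rw [List.drop_eq_nil_of_le (by omega)] at hpre
    simpa using hpre.length_le
  simp only [List.length_drop]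
  omega

def solution_alt (s : String) : Int := solutionAltGo s.toList

-- ===== PRECONDITION & SPEC =====
def Spec_solution (s : String) (out : Int) : Prop := out = solution_alt s
instance (s : String) (out : Int) : Decidable (Spec_solution s out) := by unfold Spec_solution; infer_instance

-- ===== CLAIM (what is proved, stated in full; the proofs are below) =====
def Claim_equal_solution : Prop := ∀ (s : String), Dom_solution s → Spec_solution s (solution s)

-- ===== LEMMAS AND PROOFS =====
-- reference recursion on the list structure: A's "count and skip two"
def holesRec : List Char → Int
  | [] => 0
  | c :: rest => if c = 'X' then 1 + holesRec (rest.drop 2) else holesRec rest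
termination_by l => l.length
decreasing_by
  all_goals simp only [List.length_drop, List.length_cons]; omega

theorem solutionGo_eq (cs : List Char) (holes : Int) (i : Nat) :
    solutionGo cs holes i = holes + holesRec (cs.drop i) := by
  fun_induction solutionGo cs holes i with
  | case1 holes i h hx ih =>
      rw [ih]
      rw [List.drop_eq_getElem_cons h, holesRec, if_pos hx]
      have : (cs.drop (i+1)).drop 2 = cs.drop (i+3) := by
        rw [List.drop_drop]
      rw [this]; ring
  | case2 holes i h hx ih =>
      rw [ih]
      rw [List.drop_eq_getElem_cons h, holesRec, if_neg hx]
  | case3 holes i h =>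
      rw [List.drop_eq_nil_of_le (by omega), holesRec]; ring

-- a prefix without 'X' does not change holesRec
theorem holesRec_append_no_X (pre rest : List Char) (h : ∀ c ∈ pre, c ≠ 'X') :
    holesRec (pre ++ rest) = holesRec rest := by
  induction pre with
  | nil => rfl
  | cons c t ih =>
      have hc : c ≠ 'X' := h c (by simp)
      rw [List.cons_append, holesRec, if_neg hc]
      exact ih (fun d hd => h d (by simp [hd]))

theorem holesRec_of_no_X (cs : List Char) (h : ∀ c ∈ cs, c ≠ 'X') :
    holesRec cs = 0 := by
  have h2 := holesRec_append_no_X cs [] h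
  simpa [holesRec] using h2

theorem solutionAltGo_eq (cs : List Char) : solutionAltGo cs = holesRec cs := by
  fun_induction solutionAltGo cs with
  | case1 cs j hj =>
      -- find = -1 : no 'X' in cs
      have hninf : ¬ ['X'] <:+: cs := (PySem.Chars.find_eq_neg_one_iff cs ['X']).1 hj
      rw [holesRec_of_no_X cs]
      intro c hc hcx
      exact hninf (by subst hcx; exact (List.singleton_infix_iff _ _).mpr hc)
  | case2 cs j hj ih =>
      have h0 : 0 ≤ j := by
        rcases lt_or_eq_of_le (PySem.Chars.neg_one_le_find cs ['X']) with h1 | h1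
        · omega
        · exact absurd h1.symm hj
      obtain ⟨hpre, hmin⟩ := PySem.Chars.find_spec (s := cs) (sub := ['X']) h0
      set k := j.toNat with hk
      have hlt : k < cs.length := by
        by_contra hge
        rw [List.drop_eq_nil_of_le (by omega)] at hpre
        simpa using hpre.length_le
      -- cs = take k ++ drop k, take k has no 'X', drop k starts with 'X'
      have hsplit : cs = cs.take k ++ cs.drop k := (List.take_append_drop k cs).symm
      have hnoX : ∀ c ∈ cs.take k, c ≠ 'X' := by
        intro c hc hcx
        obtain ⟨i, hi, hci⟩ := List.getElem_of_mem hc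
        have hik : i < k := by
          have := hi; simp only [List.length_take] at this; omega
        have hilen : i < cs.length := by omega
        have hcsi : cs[i] = 'X' := by
          rw [List.getElem_take] at hci
          exact hci.trans hcx
        apply hmin i hik
        exact ⟨cs.drop (i + 1), by rw [List.drop_eq_getElem_cons hilen, hcsi]; rfl⟩
      have hdropk : cs.drop k = 'X' :: cs.drop (k + 1) := by
        obtain ⟨t, ht⟩ := hpre
        rw [List.drop_eq_getElem_cons hlt] at ht
        simp only [List.cons_append, List.cons.injEq] at ht
        rw [List.drop_eq_getElem_cons hlt]
        exact congrArg (· :: cs.drop (k + 1)) ht.1.symm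
      rw [ih]
      conv_rhs => rw [hsplit]
      rw [holesRec_append_no_X _ _ hnoX, hdropk, holesRec, if_pos rfl]

-- ===== VERDICT (by name: the statement is the Claim_ definition above) =====
theorem solution_spec : Claim_equal_solution := by
  intro s _
  unfold Spec_solution solution solution_alt
  rw [solutionGo_eq, solutionAltGo_eq]
  simp
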